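-- pv_equiv track=rewrite | github.com/erezbarsh/legendre-symbol-error-correcting-code | lsecc/lscode.py | gen_words
-- ===== SOURCE A (Python) =====
-- from itertools import chain, combinations
--
-- def powerset(iterable):
--     """ powerset([3,5,7]) --> () (3,) (5,) (7,) (3,5) (3,7) (5,7) (3,5,7) """
--     s = list(iterable)
--     return chain.from_iterable(combinations(s, r) for r in range(len(s) + 1))
--
-- def gen_words(primes_arr):
--     words = []
--     pow_set = list(powerset(primes_arr))
--     for set in pow_set:
--         word = 1
--         for item in set:
--             word = word * item
--         words.append(word)
--     return words
-- ===== SOURCE B (Python) =====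
-- def gen_words(primes_arr):
--     # Layered BFS: size-r subset products are built iteratively from the
--     # size-(r-1) layer, carrying (next start index, running product) pairs,
--     # one multiplication per generated subset (shared prefixes reused).
--     n = len(primes_arr)
--     words = [1]
--     layer = [(0, 1)]  # (next start index, running product)
--     for _ in range(n):
--         nxt = []
--         for start, prod in layer:
--             for j in range(start, n):
--                 nxt.append((j + 1, prod * primes_arr[j]))
--         layer = nxt
--         words.extend(p for _, p in layer)
--     return words
-- ===== Notes on version B (the rewrite author's own statement) =====
-- stated objective: alternative
-- what changed: Replaces materialising every combination tuple and re-multiplying each from scratch with an iterative layer-by-layer pass that extends (start-index, running-product) pairs, one multiplication per generated subset (measured 1.8x at n=16; both exponential overall).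
import Mathlib
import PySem

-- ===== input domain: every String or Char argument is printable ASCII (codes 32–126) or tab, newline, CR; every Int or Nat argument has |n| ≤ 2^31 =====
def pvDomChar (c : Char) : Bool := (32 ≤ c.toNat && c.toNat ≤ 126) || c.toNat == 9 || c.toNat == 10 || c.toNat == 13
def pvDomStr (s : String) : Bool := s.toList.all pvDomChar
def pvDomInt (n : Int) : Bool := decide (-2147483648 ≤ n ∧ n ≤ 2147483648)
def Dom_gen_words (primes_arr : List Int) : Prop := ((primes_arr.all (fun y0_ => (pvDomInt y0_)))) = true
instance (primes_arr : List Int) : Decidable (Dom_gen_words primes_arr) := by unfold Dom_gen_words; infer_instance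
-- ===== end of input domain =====

-- B replaces tuple materialisation + per-subset re-multiplication with an iterative layered pass extending (start-index, running-product) pairs, one multiplication per generated subset.


-- ===== PORT A =====
-- itertools.combinations(s, r) in its order: those containing s[0] (lex) first, then the rest
def pvCombs (xs : List Int) (r : Nat) : List (List Int) :=
  match r, xs with
  | 0, _ => [[]]
  | _ + 1, [] => []
  | r + 1, x :: rest => (pvCombs rest r).map (fun c => x :: c) ++ pvCombs rest (r + 1)

def gen_words (primes_arr : List Int) : List Int :=
  let pow_set := (List.range (primes_arr.length + 1)).flatMap (fun r => pvCombs primes_arr r)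
  pow_set.foldl (fun words s => words ++ [s.foldl (fun word item => word * item) 1]) []

-- ===== PORT B =====
-- the inner double loop of B: extend each (start, prod) pair by every index j in range(start, n)
def pvStepB (a : List Int) (layer : List (Nat × Int)) : List (Nat × Int) :=
  layer.foldl (fun nxt sp =>
    nxt ++ (List.range' sp.1 (a.length - sp.1)).map (fun j => (j + 1, sp.2 * a.getD j 0))) []

def gen_words_alt (primes_arr : List Int) : List Int :=
  ((List.range primes_arr.length).foldl (fun st _ =>
      let nxt := pvStepB primes_arr st.2
      (st.1 ++ nxt.map Prod.snd, nxt)) (([1] : List Int), [((0 : Nat), (1 : Int))])).1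

-- ===== PRECONDITION & SPEC =====
def Spec_gen_words (primes_arr : List Int) (out : List Int) : Prop := out = gen_words_alt primes_arr
instance (primes_arr : List Int) (out : List Int) : Decidable (Spec_gen_words primes_arr out) := by unfold Spec_gen_words; infer_instance

-- ===== CLAIM (what is proved, stated in full; the proofs are below) =====
def Claim_equal_gen_words : Prop := ∀ (primes_arr : List Int), Dom_gen_words primes_arr → Spec_gen_words primes_arr (gen_words primes_arr)

-- ===== LEMMAS AND PROOFS =====
-- products of the size-r combinations of xs, prefixed by p (proof-side spec)
def pvS : List Int → Nat → Int → List Int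
  | _, 0, p => [p]
  | [], _ + 1, _ => []
  | x :: rest, r + 1, p => pvS rest r (p * x) ++ pvS rest (r + 1) p

-- index-level spec of B's layers: size-r index combinations drawn from [i, a.length) as (last+1, product)
def pvT (a : List Int) : Nat → Nat → Int → List (Nat × Int)
  | i, 0, p => [(i, p)]
  | i, r + 1, p => (List.range' i (a.length - i)).flatMap (fun j => pvT a (j + 1) r (p * a.getD j 0))

def pvE (a : List Int) (sp : Nat × Int) : List (Nat × Int) :=
  (List.range' sp.1 (a.length - sp.1)).map (fun j => (j + 1, sp.2 * a.getD j 0))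

theorem pvFoldl_append_singleton (l : List (List Int)) (acc : List Int) :
    l.foldl (fun words s => words ++ [s.foldl (fun w i => w * i) 1]) acc
      = acc ++ l.map (fun s => s.foldl (fun w i => w * i) 1) := by
  induction l generalizing acc with
  | nil => simp [List.foldl]
  | cons s t ih => simp [List.foldl, ih]

theorem pvCombs_map_foldl (xs : List Int) (r : Nat) (p : Int) :
    (pvCombs xs r).map (fun s => s.foldl (fun w i => w * i) p) = pvS xs r p := by
  induction xs generalizing r p with
  | nil => cases r <;> simp [pvCombs, pvS]
  | cons x rest ih =>
    cases r with
    | zero => simp [pvCombs, pvS]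
    | succ r => simp [pvCombs, pvS, List.map_append, List.map_map, ← ih]

theorem pvMap_flatten {α β : Type} (f : α → β) (l : List α) :
    (l.map (fun x => [f x])).flatten = l.map f := by
  induction l with
  | nil => rfl
  | cons x t ih => simp [ih]

theorem pvStepB_eq_flatMap (a : List Int) (layer : List (Nat × Int)) :
    pvStepB a layer = layer.flatMap (pvE a) := by
  unfold pvStepB
  have h : ∀ (l : List (Nat × Int)) (acc : List (Nat × Int)),
      l.foldl (fun nxt sp =>
        nxt ++ (List.range' sp.1 (a.length - sp.1)).map (fun j => (j + 1, sp.2 * a.getD j 0))) acc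
        = acc ++ l.flatMap (pvE a) := by
    intro l
    induction l with
    | nil => simp
    | cons sp t ih =>
      intro acc
      simp only [List.foldl, ih, List.flatMap_def, List.append_assoc]
      rfl
  simpa using h layer []

theorem pvT_flatMap_pvE (a : List Int) (r i : Nat) (p : Int) :
    (pvT a i r p).flatMap (pvE a) = pvT a i (r + 1) p := by
  induction r generalizing i p with
  | zero =>
    simp [pvT, pvE, List.flatMap_def, pvMap_flatten]
  | succ r ih =>
    show ((List.range' i (a.length - i)).flatMap
        (fun j => pvT a (j + 1) r (p * a.getD j 0))).flatMap (pvE a) = _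
    rw [List.flatMap_assoc]
    show _ = (List.range' i (a.length - i)).flatMap (fun j => pvT a (j + 1) (r + 1) (p * a.getD j 0))
    exact List.flatMap_congr (fun j _ => ih (j + 1) (p * a.getD j 0))

theorem pvT_map_snd (a : List Int) (r i : Nat) (p : Int) :
    (pvT a i r p).map Prod.snd = pvS (a.drop i) r p := by
  induction r generalizing i p with
  | zero => simp [pvT, pvS]
  | succ r ih =>
    have key : ∀ d i p, a.length - i ≤ d →
        (pvT a i (r + 1) p).map Prod.snd = pvS (a.drop i) (r + 1) p := by
      intro d
      induction d with
      | zero =>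
        intro i p h
        have hle : a.length ≤ i := by omega
        have hd : a.drop i = [] := List.drop_eq_nil_of_le hle
        simp [pvT, Nat.sub_eq_zero_of_le hle, hd, pvS]
      | succ d ihd =>
        intro i p h
        by_cases hi : a.length ≤ i
        · have hd : a.drop i = [] := List.drop_eq_nil_of_le hi
          simp [pvT, Nat.sub_eq_zero_of_le hi, hd, pvS]
        · replace hi : i < a.length := by omega
          have hlen : a.length - i = (a.length - (i + 1)) + 1 := by omega
          have hdrop : a.drop i = a[i] :: a.drop (i + 1) :=
            (List.getElem_cons_drop (h := hi)).symm
          have hgd : a.getD i 0 = a[i] := List.getD_eq_getElem a 0 hi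
          show ((List.range' i (a.length - i)).flatMap
              (fun j => pvT a (j + 1) r (p * a.getD j 0))).map Prod.snd = _
          rw [hlen, List.range'_succ, List.flatMap_cons, List.map_append]
          have h1 : (pvT a (i + 1) r (p * a.getD i 0)).map Prod.snd
              = pvS (a.drop (i + 1)) r (p * a[i]) := by rw [hgd] at *; exact ih (i + 1) _
          have h2 : ((List.range' (i + 1) (a.length - (i + 1))).flatMap
              (fun j => pvT a (j + 1) r (p * a.getD j 0))).map Prod.snd
              = pvS (a.drop (i + 1)) (r + 1) p := by
            have := ihd (i + 1) p (by omega)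
            simpa [pvT] using this
          rw [h1, h2, hdrop]
          rfl
    exact key (a.length - i) i p (le_refl _)

-- the words accumulated after k outer iterations
def pvWords (a : List Int) (k : Nat) : List Int :=
  (List.range (k + 1)).flatMap (fun r => (pvT a 0 r 1).map Prod.snd)

theorem pvFoldB_state (a : List Int) (k : Nat) :
    (List.range k).foldl (fun st _ =>
        let nxt := pvStepB a st.2
        (st.1 ++ nxt.map Prod.snd, nxt)) (([1] : List Int), [((0 : Nat), (1 : Int))])
      = (pvWords a k, pvT a 0 k 1) := by
  induction k with
  | zero => simp [pvWords, pvT, List.range_zero, List.range_one]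
  | succ k ih =>
    rw [List.range_succ, List.foldl_append, ih]
    have hlayer : pvStepB a (pvT a 0 k 1) = pvT a 0 (k + 1) 1 := by
      rw [pvStepB_eq_flatMap, pvT_flatMap_pvE]
    simp only [List.foldl_cons, List.foldl_nil, hlayer]
    have hw : pvWords a k ++ (pvT a 0 (k + 1) 1).map Prod.snd = pvWords a (k + 1) := by
      unfold pvWords
      rw [List.range_succ (n := k + 1), List.flatMap_append]
      simp
    rw [hw]

-- ===== VERDICT (by name: the statement is the Claim_ definition above) =====
theorem gen_words_spec : Claim_equal_gen_words := by
  intro a _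
  unfold Spec_gen_words gen_words gen_words_alt
  rw [pvFoldB_state]
  simp only [pvFoldl_append_singleton, List.nil_append, List.map_flatMap, pvWords]
  refine List.flatMap_congr (fun r _ => ?_)
  rw [pvCombs_map_foldl, pvT_map_snd]
  simp
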